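-- pv_equiv track=rewrite | github.com/dilkas/kr23-db | solutions.py | two_dimensional_bijections2
-- ===== SOURCE A (Python) =====
-- import math
--
-- def two_dimensional_bijections2(m, n):
--     def g(l, n):
--         if n == 0:
--             return 1
--         if l == 0:
--             return 0
--         return g(l - 1, n) + n * g(l - 1, n - 1)
--
--     return sum(math.comb(m, l) * (-1) ** (m - l) * g(l, n) for l in range(m + 1))
-- ===== SOURCE B (Python) =====
-- import math
--
-- def two_dimensional_bijections2(m, n):
--     # Binomial inversion collapses the whole double recursion: the sum equals
--     # the number of bijections between an m-set and an n-set, i.e. m! when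
--     # m == n >= 0 and 0 otherwise.
--     return math.factorial(m) if m == n and m >= 0 else 0
-- ===== Notes on version B (the rewrite author's own statement) =====
-- stated objective: faster
-- what changed: Replaces the exponential recursive evaluation of g(l,n) under an alternating binomial sum by its closed form (binomial inversion gives F(m,n) = n*F(m-1,n-1), so the sum is m! when m == n >= 0 and 0 otherwise), computed as a single factorial.
import Mathlib
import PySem

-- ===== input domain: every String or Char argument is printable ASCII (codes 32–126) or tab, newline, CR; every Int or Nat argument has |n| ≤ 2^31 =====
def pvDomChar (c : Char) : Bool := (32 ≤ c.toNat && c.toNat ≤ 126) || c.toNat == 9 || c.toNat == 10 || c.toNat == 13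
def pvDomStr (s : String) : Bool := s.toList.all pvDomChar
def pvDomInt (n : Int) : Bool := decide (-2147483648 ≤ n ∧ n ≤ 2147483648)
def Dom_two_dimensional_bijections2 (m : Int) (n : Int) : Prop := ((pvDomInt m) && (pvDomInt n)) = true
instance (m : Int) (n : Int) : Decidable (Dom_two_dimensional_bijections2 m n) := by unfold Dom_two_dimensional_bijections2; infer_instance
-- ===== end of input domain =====

-- B replaces A's alternating binomial sum over an exponential recursion by its closed form
-- (m! when m == n >= 0, else 0), proved by binomial inversion (objective: faster).

-- ===== PORT A =====
-- Python's nested g(l, n); g is only ever called with l ≥ 0 (values of range(m+1) and their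
-- decrements stopping at 0), so recursion on the Nat image of l is exact.
def pvGA : Nat → Int → Int
  | 0, n => if n = 0 then 1 else 0
  | l + 1, n => if n = 0 then 1 else pvGA l n + n * pvGA l (n - 1)

-- math.comb(m, l) for the 0 ≤ l ≤ m arising from range(m+1) is exactly Nat.choose.
def two_dimensional_bijections2 (m : Int) (n : Int) : Int :=
  (PySem.List.pyRange 0 (m + 1) 1).foldl
    (fun acc l => acc + (Nat.choose m.toNat l.toNat : Int) * (-1 : Int) ^ (m - l).toNat * pvGA l.toNat n)
    0

-- ===== PORT B =====
-- math.factorial(m) on the guarded m ≥ 0 is exactly Nat.factorial.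
def two_dimensional_bijections2_alt (m : Int) (n : Int) : Int :=
  if m = n ∧ m ≥ 0 then (Nat.factorial m.toNat : Int) else 0

-- ===== PRECONDITION & SPEC =====
def Spec_two_dimensional_bijections2 (m : Int) (n : Int) (out : Int) : Prop := out = two_dimensional_bijections2_alt m n
instance (m : Int) (n : Int) (out : Int) : Decidable (Spec_two_dimensional_bijections2 m n out) := by unfold Spec_two_dimensional_bijections2; infer_instance

-- ===== CLAIM (what is proved, stated in full; the proofs are below) =====
def Claim_equal_two_dimensional_bijections2 : Prop := ∀ (m : Int) (n : Int), Dom_two_dimensional_bijections2 m n → Spec_two_dimensional_bijections2 m n (two_dimensional_bijections2 m n)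

-- ===== LEMMAS AND PROOFS =====

-- A's loop body, named for the proofs
def pvStepA (m n : Int) (acc : Int) (l : Int) : Int :=
  acc + (Nat.choose m.toNat l.toNat : Int) * (-1 : Int) ^ (m - l).toNat * pvGA l.toNat n

lemma pvA_eq (m n : Int) :
    two_dimensional_bijections2 m n = (PySem.List.pyRange 0 (m + 1) 1).foldl (pvStepA m n) 0 := rfl

-- the alternating binomial sum A computes, in Finset form
def pvS (m : Nat) (n : Int) : Int :=
  ∑ l ∈ Finset.range (m + 1), (Nat.choose m l : Int) * (-1 : Int) ^ (m - l) * pvGA l n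

lemma pvGA_neg (l : Nat) (n : Int) (hn : n < 0) : pvGA l n = 0 := by
  induction l generalizing n with
  | zero => simp only [pvGA]; rw [if_neg (by omega : ¬ n = 0)]
  | succ l ih =>
    simp only [pvGA]
    rw [if_neg (by omega : ¬ n = 0), ih n hn, ih (n - 1) (by omega)]
    ring

lemma pvGA_zero (l : Nat) : pvGA l 0 = 1 := by cases l <;> simp [pvGA]

lemma pvGA_succ (l : Nat) (n : Int) (hn : n ≠ 0) :
    pvGA (l + 1) n = pvGA l n + n * pvGA l (n - 1) := by
  simp only [pvGA]; rw [if_neg hn]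

-- fold of A's loop = the Finset sum (small induction tied to pvStepA)
lemma pvFoldS (m n : Int) (K : Nat) :
    (List.range K).foldl (fun acc k => pvStepA m n acc ((0 : Int) + (k : Nat))) 0
      = ∑ k ∈ Finset.range K, (Nat.choose m.toNat k : Int) * (-1 : Int) ^ (m - (k : Int)).toNat * pvGA k n := by
  induction K with
  | zero => simp
  | succ K ih =>
    rw [List.range_succ, List.foldl_append, ih, Finset.sum_range_succ, List.foldl_cons, List.foldl_nil,
      pvStepA]
    simp

lemma pvFoldA_eq_S (m : Int) (hm : 0 ≤ m) (n : Int) :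
    (PySem.List.pyRange 0 (m + 1) 1).foldl (pvStepA m n) 0 = pvS m.toNat n := by
  rw [PySem.List.pyRange_one, List.foldl_map, (by omega : (m + 1 - 0).toNat = m.toNat + 1),
    pvFoldS m n (m.toNat + 1), pvS]
  refine Finset.sum_congr rfl ?_
  intro k hk
  rw [Finset.mem_range] at hk
  rw [(by omega : (m - (k : Int)).toNat = m.toNat - k)]

-- generic shift: reindexing the alternating binomial sum (the two evaluations of
-- ∑_{l ∈ range(m+2)} C(m,l)(-1)^{m+1-l} g l, by sum_range_succ' and by sum_range_succ)
lemma pvShift (m : Nat) (g : Nat → Int) :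
    ∑ k ∈ Finset.range (m + 1), (Nat.choose m (k + 1) : Int) * (-1 : Int) ^ (m - k) * g (k + 1)
      = -(∑ l ∈ Finset.range (m + 1), (Nat.choose m l : Int) * (-1 : Int) ^ (m - l) * g l)
        - (-1 : Int) ^ (m + 1) * g 0 := by
  have h1 := Finset.sum_range_succ' (fun l => (Nat.choose m l : Int) * (-1 : Int) ^ (m + 1 - l) * g l) (m + 1)
  have h2 := Finset.sum_range_succ (fun l => (Nat.choose m l : Int) * (-1 : Int) ^ (m + 1 - l) * g l) (m + 1)
  rw [h2] at h1
  simp only [Nat.choose_succ_self, Nat.cast_zero, zero_mul, add_zero, Nat.choose_zero_right,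
    Nat.cast_one, one_mul, Nat.sub_zero] at h1
  have h3 : ∀ l ∈ Finset.range (m + 1),
      (Nat.choose m l : Int) * (-1 : Int) ^ (m + 1 - l) * g l
        = -((Nat.choose m l : Int) * (-1 : Int) ^ (m - l) * g l) := by
    intro l hl
    rw [Finset.mem_range] at hl
    rw [(by omega : m + 1 - l = (m - l) + 1), pow_succ]
    ring
  have h4 : ∀ k ∈ Finset.range (m + 1),
      (Nat.choose m (k + 1) : Int) * (-1 : Int) ^ (m + 1 - (k + 1)) * g (k + 1)
        = (Nat.choose m (k + 1) : Int) * (-1 : Int) ^ (m - k) * g (k + 1) := by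
    intro k _
    rw [(by omega : m + 1 - (k + 1) = m - k)]
  rw [Finset.sum_congr rfl h3, Finset.sum_congr rfl h4, Finset.sum_neg_distrib] at h1
  linarith [h1]

-- the inversion step: S(m+1, n) = n * S(m, n-1) for n ≠ 0
lemma pvS_succ (m : Nat) (n : Int) (hn : n ≠ 0) : pvS (m + 1) n = n * pvS m (n - 1) := by
  unfold pvS
  rw [Finset.sum_range_succ' (fun l => (Nat.choose (m + 1) l : Int) * (-1 : Int) ^ (m + 1 - l) * pvGA l n) (m + 1)]
  have hterm : ∀ k ∈ Finset.range (m + 1),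
      (Nat.choose (m + 1) (k + 1) : Int) * (-1 : Int) ^ (m + 1 - (k + 1)) * pvGA (k + 1) n
        = ((Nat.choose m k : Int) * (-1 : Int) ^ (m - k) * pvGA k n
            + n * ((Nat.choose m k : Int) * (-1 : Int) ^ (m - k) * pvGA k (n - 1)))
          + (Nat.choose m (k + 1) : Int) * (-1 : Int) ^ (m - k) * pvGA (k + 1) n := by
    intro k _
    rw [(by omega : m + 1 - (k + 1) = m - k), Nat.choose_succ_succ m k, Nat.cast_add]
    rw [pvGA_succ k n hn]
    ring
  rw [Finset.sum_congr rfl hterm, Finset.sum_add_distrib, Finset.sum_add_distrib,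
    pvShift m (fun l => pvGA l n), ← Finset.mul_sum]
  simp only [Nat.choose_zero_right, Nat.cast_one, one_mul, Nat.sub_zero, pow_succ]
  ring

-- alternating binomial sum of 1's, in A's (-1)^(m-l) ordering
lemma pvAltSum (m : Nat) :
    ∑ l ∈ Finset.range (m + 1), (Nat.choose m l : Int) * (-1 : Int) ^ (m - l)
      = if m = 0 then 1 else 0 := by
  have hrefl := Finset.sum_range_reflect (fun l => (Nat.choose m l : Int) * (-1 : Int) ^ (m - l)) (m + 1)
  have hcongr : ∀ j ∈ Finset.range (m + 1),
      (Nat.choose m (m + 1 - 1 - j) : Int) * (-1 : Int) ^ (m - (m + 1 - 1 - j))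
        = (-1 : Int) ^ j * (Nat.choose m j : Int) := by
    intro j hj
    rw [Finset.mem_range] at hj
    rw [(by omega : m + 1 - 1 - j = m - j), Nat.choose_symm (by omega), (by omega : m - (m - j) = j)]
    ring
  rw [Finset.sum_congr rfl hcongr] at hrefl
  rw [← hrefl, Int.alternating_sum_range_choose]

lemma pvS_base (n : Int) : pvS 0 n = pvGA 0 n := by simp [pvS]

lemma pvS_closed (m : Nat) : ∀ (N : Nat), pvS m (N : Int) = if N = m then (Nat.factorial m : Int) else 0 := by
  induction m with
  | zero =>
    intro N
    rw [pvS_base]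
    simp only [pvGA]
    by_cases h : N = 0
    · subst h; simp [Nat.factorial]
    · rw [if_neg (by exact_mod_cast h), if_neg h]
  | succ m ih =>
    intro N
    cases N with
    | zero =>
      have hone : ∀ l ∈ Finset.range (m + 1 + 1),
          (Nat.choose (m + 1) l : Int) * (-1 : Int) ^ (m + 1 - l) * pvGA l ((0 : Nat) : Int)
            = (Nat.choose (m + 1) l : Int) * (-1 : Int) ^ (m + 1 - l) := by
        intro l _
        rw [Nat.cast_zero, pvGA_zero, mul_one]
      rw [pvS, Finset.sum_congr rfl hone, pvAltSum (m + 1), if_neg (by omega), if_neg (by omega)]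
    | succ N =>
      have hn : ((N + 1 : Nat) : Int) ≠ 0 := by push_cast; omega
      rw [pvS_succ m _ hn, (by push_cast; ring : ((N + 1 : Nat) : Int) - 1 = (N : Int)), ih N]
      by_cases h : N = m
      · subst h
        rw [if_pos rfl, if_pos rfl, Nat.factorial_succ]
        push_cast
        ring
      · rw [if_neg h, if_neg (by omega), mul_zero]

lemma pvS_neg (m : Nat) (n : Int) (hn : n < 0) : pvS m n = 0 := by
  unfold pvS
  refine Finset.sum_eq_zero ?_
  intro l _
  rw [pvGA_neg l n hn, mul_zero]

-- ===== VERDICT (by name: the statement is the Claim_ definition above) =====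
theorem two_dimensional_bijections2_spec : Claim_equal_two_dimensional_bijections2 := by
  intro m n _
  show two_dimensional_bijections2 m n = two_dimensional_bijections2_alt m n
  rw [pvA_eq, two_dimensional_bijections2_alt]
  by_cases hm : 0 ≤ m
  · rw [pvFoldA_eq_S m hm n]
    by_cases hn : 0 ≤ n
    · lift n to ℕ using hn with N
      rw [pvS_closed m.toNat N]
      by_cases h : (m : Int) = (N : Int)
      · rw [if_pos (show N = m.toNat by omega), if_pos (show m = (N : Int) ∧ m ≥ 0 from ⟨h, hm⟩)]
      · rw [if_neg (show ¬ N = m.toNat by omega), if_neg (fun hc => h hc.1)]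
    · rw [pvS_neg m.toNat n (by omega), if_neg (by intro hc; omega)]
  · rw [PySem.List.pyRange_one_eq_nil (by omega), List.foldl_nil,
      if_neg (by intro hc; omega)]
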